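-- pv_equiv track=rewrite | github.com/akoarguel/Programacion-en-Inteligencia-Artificial | Prácticas/Unidad 2 - Introducción a Python/Trabajo de Clase/Ejercicio Cadenas/Ejercicio_Cadenas.py | enc4
-- ===== SOURCE A (Python) =====
-- def enc4(msg, key):
--     cont = 0
--
--     for letra in key:
--         if not letra.isalnum():
--             cont += 1
--             if cont >= 2:
--                 break
--
--     temp_msg = ""
--     n = len(msg)
--
--     if cont >= 2:
--         for i in range(n):
--             letra = msg[i]
--
--             if i < 3:
--                 temp_msg += chr(ord(letra) - 1)
--             else:
--                 temp_msg += letra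
--
--     else:
--         punto_inicio = max(0, n - 3)
--
--         for i in range(n):
--             letra = msg[i]
--
--             if i >= punto_inicio:
--                 temp_msg += chr(ord(letra) + 1)
--             else:
--                 temp_msg += letra
--
--     new_msg = temp_msg[::-1]
--     return new_msg
-- ===== SOURCE B (Python) =====
-- def enc4(msg, key):
--     if sum(1 for c in key if not c.isalnum()) >= 2:
--         res = ''.join(chr(ord(c) - 1) for c in msg[:3]) + msg[3:]
--     else:
--         k = max(0, len(msg) - 3)
--         res = msg[:k] + ''.join(chr(ord(c) + 1) for c in msg[k:])
--     return res[::-1]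
-- ===== Notes on version B (the rewrite author's own statement) =====
-- stated objective: faster
-- what changed: B replaces A's early-break key loop by a total non-alphanumeric count and replaces A's per-index threshold-tested loop with quadratic-prone string += by slicing the message into a shifted region and an untouched region, built with join and concatenation.
import Mathlib
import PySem

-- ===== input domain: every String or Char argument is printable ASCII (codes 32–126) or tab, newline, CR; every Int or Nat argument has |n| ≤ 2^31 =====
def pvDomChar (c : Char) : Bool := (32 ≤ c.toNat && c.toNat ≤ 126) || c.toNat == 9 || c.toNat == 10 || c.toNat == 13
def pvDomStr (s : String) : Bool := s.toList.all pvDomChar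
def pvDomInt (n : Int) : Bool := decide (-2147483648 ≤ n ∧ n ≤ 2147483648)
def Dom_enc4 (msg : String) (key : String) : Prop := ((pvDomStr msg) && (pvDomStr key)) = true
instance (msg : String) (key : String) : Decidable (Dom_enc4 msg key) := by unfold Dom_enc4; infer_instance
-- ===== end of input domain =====

-- B replaces A's early-break key loop by a total count and A's per-index branch loop by slice regions; same cost, more idiomatic.
-- ===== PORT A =====
-- the key loop: cont += 1 on each non-alnum char, break as soon as cont >= 2
def enc4KeyCont : List Char → Nat → Nat
  | [], cont => cont
  | c :: rest, cont =>
    if PySem.Chars.isalnum c then enc4KeyCont rest cont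
    else if cont + 1 ≥ 2 then cont + 1 else enc4KeyCont rest (cont + 1)

-- for i in range(n): shift msg[i] down by one iff i < 3   (traversal carries the running index i)
def enc4LoopHi : List Char → Nat → List Char
  | [], _ => []
  | c :: rest, i =>
    (if i < 3 then Char.ofNat (c.toNat - 1) else c) :: enc4LoopHi rest (i + 1)

-- for i in range(n): shift msg[i] up by one iff i >= punto_inicio
def enc4LoopLo : List Char → Nat → Int → List Char
  | [], _, _ => []
  | c :: rest, i, punto =>
    (if (i : Int) ≥ punto then Char.ofNat (c.toNat + 1) else c) :: enc4LoopLo rest (i + 1) punto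

def enc4 (msg : String) (key : String) : String :=
  let cont := enc4KeyCont key.toList 0
  let cs := msg.toList
  let n : Int := cs.length
  let temp : List Char :=
    if cont ≥ 2 then enc4LoopHi cs 0
    else enc4LoopLo cs 0 (max 0 (n - 3))
  String.ofList temp.reverse

-- ===== PORT B =====
def enc4_alt (msg : String) (key : String) : String :=
  let cs := msg.toList
  let res : List Char :=
    if 2 ≤ key.toList.countP (fun c => !PySem.Chars.isalnum c) then
      (cs.take 3).map (fun c => Char.ofNat (c.toNat - 1)) ++ cs.drop 3
    else
      let k := cs.length - 3   -- max(0, len(msg) - 3)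
      cs.take k ++ (cs.drop k).map (fun c => Char.ofNat (c.toNat + 1))
  String.ofList res.reverse

-- ===== PRECONDITION & SPEC =====
def Spec_enc4 (msg : String) (key : String) (out : String) : Prop := out = enc4_alt msg key
instance (msg : String) (key : String) (out : String) : Decidable (Spec_enc4 msg key out) := by unfold Spec_enc4; infer_instance

-- ===== CLAIM (what is proved, stated in full; the proofs are below) =====
def Claim_equal_enc4 : Prop := ∀ (msg : String) (key : String), Dom_enc4 msg key → Spec_enc4 msg key (enc4 msg key)

-- ===== LEMMAS AND PROOFS =====
-- the break loop reaches 2 exactly when the total count reaches 2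
theorem enc4KeyCont_ge2 (cs : List Char) : ∀ cont : Nat,
    (2 ≤ enc4KeyCont cs cont ↔ 2 ≤ cont + cs.countP (fun c => !PySem.Chars.isalnum c)) := by
  induction cs with
  | nil => intro cont; simp [enc4KeyCont]
  | cons c rest ih =>
    intro cont
    by_cases h : PySem.Chars.isalnum c
    · simp [enc4KeyCont, h, ih cont]
    · by_cases h2 : cont + 1 ≥ 2
      · simp [enc4KeyCont, h, h2]; omega
      · simp [enc4KeyCont, h, h2, ih (cont + 1)]; omega

theorem enc4LoopHi_eq (cs : List Char) : ∀ i : Nat,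
    enc4LoopHi cs i =
      (cs.take (3 - i)).map (fun c => Char.ofNat (c.toNat - 1)) ++ cs.drop (3 - i) := by
  induction cs with
  | nil => intro i; simp [enc4LoopHi]
  | cons c rest ih =>
    intro i
    by_cases h : i < 3
    · have h3 : 3 - i = (3 - (i + 1)) + 1 := by omega
      simp [enc4LoopHi, h, h3, ih (i + 1)]
    · have h3 : 3 - i = 0 := by omega
      have h4 : 3 - (i + 1) = 0 := by omega
      simp [enc4LoopHi, h, h3, ih (i + 1), h4]

theorem enc4LoopLo_eq (cs : List Char) : ∀ (i : Nat) (punto : Int),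
    enc4LoopLo cs i punto =
      cs.take (punto - i).toNat ++
        (cs.drop (punto - i).toNat).map (fun c => Char.ofNat (c.toNat + 1)) := by
  induction cs with
  | nil => intro i punto; simp [enc4LoopLo]
  | cons c rest ih =>
    intro i punto
    by_cases h : (i : Int) ≥ punto
    · have h0 : (punto - i).toNat = 0 := by omega
      have h1 : (punto - ((i : Int) + 1)).toNat = 0 := by omega
      simp [enc4LoopLo, h, h0, ih (i + 1), h1, Nat.cast_add, Nat.cast_one]
    · have h0 : (punto - i).toNat = (punto - ((i : Int) + 1)).toNat + 1 := by omega
      simp [enc4LoopLo, h, h0, ih (i + 1), Nat.cast_add, Nat.cast_one]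

-- ===== VERDICT (by name: the statement is the Claim_ definition above) =====
theorem enc4_spec : Claim_equal_enc4 := by
  intro msg key _
  unfold Spec_enc4 enc4 enc4_alt
  simp only
  by_cases h : 2 ≤ key.toList.countP (fun c => !PySem.Chars.isalnum c)
  · have hk : 2 ≤ enc4KeyCont key.toList 0 := by
      rw [enc4KeyCont_ge2]; omega
    rw [if_pos hk, if_pos h, enc4LoopHi_eq]
  · have hk : ¬ 2 ≤ enc4KeyCont key.toList 0 := by
      rw [enc4KeyCont_ge2]; omega
    rw [if_neg hk, if_neg h, enc4LoopLo_eq]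
    have : (max 0 ((msg.toList.length : Int) - 3) - (0 : Nat)).toNat = msg.toList.length - 3 := by
      omega
    rw [this]
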